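-- pv_equiv track=rewrite | github.com/samuel-bazinet/aoc_2024 | day7/part_1.py | verify_ops
-- ===== SOURCE A (Python) =====
-- from itertools import product
--
-- OPERATORS = ['+', '*']
--
-- def verify_ops(result: int, operands: list[int]) -> bool:
--     opss = product(OPERATORS, repeat=len(operands)-1)
--     for ops in opss:
--         v = operands[0]
--         for i in range(len(operands)-1):
--             if ops[i] == '+':
--                 v += operands[i+1]
--             else:
--                 v *= operands[i+1]
--         if v == result:
--             return True
--     return False
-- ===== SOURCE B (Python) =====
-- def verify_ops(result: int, operands: list[int]) -> bool:
--     # DP over prefixes: set of all values reachable with +/* over the prefix.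
--     reachable = {operands[0]}
--     for x in operands[1:]:
--         nxt = set()
--         for v in reachable:
--             nxt.add(v + x)
--             nxt.add(v * x)
--         reachable = nxt
--     return result in reachable
-- ===== Notes on version B (the rewrite author's own statement) =====
-- stated objective: alternative
-- what changed: Replaces the enumeration of all 2^(n-1) operator tuples (each re-evaluated left to right) by a forward DP that keeps the set of values reachable over each prefix, merging duplicate values as it goes.
import Mathlib
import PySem

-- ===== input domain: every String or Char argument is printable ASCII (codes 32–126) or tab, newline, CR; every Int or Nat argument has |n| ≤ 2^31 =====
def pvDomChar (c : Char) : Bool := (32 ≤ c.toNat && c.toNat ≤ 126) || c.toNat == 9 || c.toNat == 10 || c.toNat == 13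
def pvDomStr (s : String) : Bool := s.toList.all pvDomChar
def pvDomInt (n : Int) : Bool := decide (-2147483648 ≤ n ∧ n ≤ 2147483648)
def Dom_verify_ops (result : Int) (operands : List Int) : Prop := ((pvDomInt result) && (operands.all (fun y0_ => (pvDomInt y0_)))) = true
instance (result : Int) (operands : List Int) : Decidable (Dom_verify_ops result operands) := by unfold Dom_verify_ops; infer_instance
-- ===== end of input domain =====

-- B is a forward DP over the reachable-value set instead of A's enumeration of all operator tuples.

-- ===== PORT A =====
-- itertools.product(['+','*'], repeat=n), in product's tuple order (leftmost varies slowest);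
-- hand-ported since PySem has no `product` (exact: same lists, same order).
def opLists : Nat → List (List Char)
  | 0 => [[]]
  | n + 1 => ['+', '*'].flatMap (fun c => (opLists n).map (fun t => c :: t))

def verify_ops (result : Int) (operands : List Int) : Bool :=
  (opLists (((operands.length : Int) - 1).toNat)).any (fun ops =>
    ((PySem.List.pyRange 0 ((operands.length : Int) - 1) 1).foldl
      (fun v i =>
        if PySem.List.pyGetD ops i ' ' == '+' then v + PySem.List.pyGetD operands (i + 1) 0
        else v * PySem.List.pyGetD operands (i + 1) 0)
      (PySem.List.pyGetD operands 0 0)) == result)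

-- ===== PORT B =====
def verify_ops_alt (result : Int) (operands : List Int) : Bool :=
  let reach : PySem.Set Int :=
    (PySem.List.slice operands (some 1) none).foldl
      (fun s x =>
        s.foldl (fun t v => PySem.Set.add (PySem.Set.add t (v + x)) (v * x)) PySem.Set.empty)
      (PySem.Set.ofList [PySem.List.pyGetD operands 0 0])
  PySem.Set.contains reach result

-- ===== PRECONDITION & SPEC =====
-- On the empty list A raises ValueError (product with repeat=-1) and B raises IndexError (operands[0]).
def Pre_verify_ops (result : Int) (operands : List Int) : Prop := operands ≠ []
instance (result : Int) (operands : List Int) : Decidable (Pre_verify_ops result operands) := by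
  unfold Pre_verify_ops; infer_instance
def pvWitness_verify_ops : Int × List Int := (7, [2, 3, 1])

def Spec_verify_ops (result : Int) (operands : List Int) (out : Bool) : Prop := out = verify_ops_alt result operands
instance (result : Int) (operands : List Int) (out : Bool) : Decidable (Spec_verify_ops result operands out) := by unfold Spec_verify_ops; infer_instance

-- ===== CLAIM (what is proved, stated in full; the proofs are below) =====
def Claim_equal_verify_ops : Prop := ∀ (result : Int) (operands : List Int), Dom_verify_ops result operands → Pre_verify_ops result operands → Spec_verify_ops result operands (verify_ops result operands)

-- ===== LEMMAS AND PROOFS =====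

-- evaluation of an operator list against the tail, as a zip fold (common form of both sides)
def evalZip (a : Int) (xs : List Int) (ops : List Char) : Int :=
  (ops.zip xs).foldl (fun v p => if p.1 == '+' then v + p.2 else v * p.2) a

lemma length_of_mem_opLists : ∀ {n : Nat} {ops : List Char}, ops ∈ opLists n → ops.length = n := by
  intro n
  induction n with
  | zero => intro ops h; simp [opLists] at h; simp [h]
  | succ n ih =>
      intro ops h
      simp only [opLists, List.mem_flatMap, List.mem_map] at h
      obtain ⟨c, _, t, ht, rfl⟩ := h
      simp [ih ht]

lemma mem_opLists_succ {n : Nat} {ops : List Char} :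
    ops ∈ opLists (n + 1) ↔ ∃ c, (c = '+' ∨ c = '*') ∧ ∃ t ∈ opLists n, ops = c :: t := by
  simp only [opLists, List.mem_flatMap, List.mem_map]
  constructor
  · rintro ⟨c, hc, t, ht, rfl⟩
    exact ⟨c, by simpa using hc, t, ht, rfl⟩
  · rintro ⟨c, hc, t, ht, rfl⟩
    exact ⟨c, by simpa using hc, t, ht, rfl⟩

-- A's index loop over range(len-1) equals the zip fold, on Nat ranges first
lemma natFold : ∀ (xs : List Int) (ops : List Char) (v : Int), xs.length ≤ ops.length →
    (List.range xs.length).foldl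
      (fun v k => if ops.getD k ' ' == '+' then v + xs.getD k 0 else v * xs.getD k 0) v
    = (ops.zip xs).foldl (fun v p => if p.1 == '+' then v + p.2 else v * p.2) v := by
  intro xs
  induction xs with
  | nil => intro ops v _; simp
  | cons x xs ih =>
      intro ops v h
      cases ops with
      | nil => simp at h
      | cons o ops =>
          simp only [List.length_cons]
          rw [List.range_succ_eq_map, List.foldl_cons, List.foldl_map]
          simp only [List.getD_cons_succ, List.getD_cons_zero, List.zip_cons_cons, List.foldl_cons]
          exact ih ops _ (by simpa using h)

-- the fold A actually runs (Int range, pyGetD on the full operand list) equals evalZip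
lemma evalA_eq_evalZip (a : Int) (rest : List Int) (ops : List Char)
    (hlen : rest.length ≤ ops.length) (v : Int) :
    (PySem.List.pyRange 0 ((rest.length : Int)) 1).foldl
      (fun v i =>
        if PySem.List.pyGetD ops i ' ' == '+' then v + PySem.List.pyGetD (a :: rest) (i + 1) 0
        else v * PySem.List.pyGetD (a :: rest) (i + 1) 0) v
    = evalZip v rest ops := by
  have hr : PySem.List.pyRange 0 ((rest.length : Int)) 1
      = (List.range rest.length).map (fun k : Nat => (k : Int)) := by
    rw [PySem.List.pyRange_zero_natCast]
  have hfun : ∀ (w : Int) (k : Nat),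
      (if PySem.List.pyGetD ops ((k : Int)) ' ' == '+' then w + PySem.List.pyGetD (a :: rest) ((k : Int) + 1) 0
       else w * PySem.List.pyGetD (a :: rest) ((k : Int) + 1) 0)
      = (if ops.getD k ' ' == '+' then w + rest.getD k 0 else w * rest.getD k 0) := by
    intro w k
    have h1 : ((k : Int) + 1) = ((k + 1 : Nat) : Int) := by push_cast; ring
    rw [h1, PySem.List.pyGetD_natCast, PySem.List.pyGetD_natCast]
    simp
  rw [hr, List.foldl_map]
  rw [PySem.List.foldl_congr_mem (List.range rest.length) _
        (fun w k => if ops.getD k ' ' == '+' then w + rest.getD k 0 else w * rest.getD k 0) v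
        (fun w k _ => hfun w k)]
  exact natFold rest ops v hlen

-- B's inner loop: membership in the one-step successor set
lemma mem_stepFold : ∀ (S : List Int) (x : Int) (t : PySem.Set Int) (r : Int),
    r ∈ S.foldl (fun t v => PySem.Set.add (PySem.Set.add t (v + x)) (v * x)) t
      ↔ r ∈ t ∨ ∃ v ∈ S, r = v + x ∨ r = v * x := by
  intro S
  induction S with
  | nil => intro x t r; simp
  | cons w S ih =>
      intro x t r
      rw [List.foldl_cons, ih]
      simp only [PySem.Set.mem_add, List.mem_cons]
      constructor
      · rintro (((h | h) | h) | ⟨v, hv, h⟩)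
        · exact Or.inl h
        · exact Or.inr ⟨w, Or.inl rfl, Or.inl h⟩
        · exact Or.inr ⟨w, Or.inl rfl, Or.inr h⟩
        · exact Or.inr ⟨v, Or.inr hv, h⟩
      · rintro (h | ⟨v, (rfl | hv), h⟩)
        · exact Or.inl (Or.inl (Or.inl h))
        · rcases h with h | h
          · exact Or.inl (Or.inl (Or.inr h))
          · exact Or.inl (Or.inr h)
        · exact Or.inr ⟨v, hv, h⟩

-- B's outer loop: the reachable set is exactly the set of evalZip values
lemma mem_reach : ∀ (xs : List Int) (S : PySem.Set Int) (r : Int),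
    r ∈ xs.foldl
        (fun s x => s.foldl (fun t v => PySem.Set.add (PySem.Set.add t (v + x)) (v * x)) PySem.Set.empty) S
      ↔ ∃ v ∈ S, ∃ ops ∈ opLists xs.length, evalZip v xs ops = r := by
  intro xs
  induction xs with
  | nil =>
      intro S r
      simp [opLists, evalZip]
  | cons x xs ih =>
      intro S r
      rw [List.foldl_cons, ih]
      constructor
      · rintro ⟨w, hw, ops, hops, rfl⟩
        rw [mem_stepFold] at hw
        rcases hw with h | ⟨v, hv, hw⟩
        · simp [PySem.Set.empty] at h
        · rcases hw with rfl | rfl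
          · exact ⟨v, hv, '+' :: ops, mem_opLists_succ.mpr ⟨'+', Or.inl rfl, ops, hops, rfl⟩,
              by simp [evalZip]⟩
          · exact ⟨v, hv, '*' :: ops, mem_opLists_succ.mpr ⟨'*', Or.inr rfl, ops, hops, rfl⟩,
              by simp [evalZip]⟩
      · rintro ⟨v, hv, ops, hops, rfl⟩
        rcases mem_opLists_succ.mp hops with ⟨c, hc, t, ht, rfl⟩
        refine ⟨if c == '+' then v + x else v * x, ?_, t, ht, by simp [evalZip]⟩
        rw [mem_stepFold]
        rcases hc with rfl | rfl
        · exact Or.inr ⟨v, hv, Or.inl (by simp)⟩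
        · exact Or.inr ⟨v, hv, Or.inr (by simp)⟩

-- ===== VERDICT (by name: the statement is the Claim_ definition above) =====
theorem verify_ops_spec : Claim_equal_verify_ops := by
  intro result operands _ hpre
  unfold Spec_verify_ops
  cases operands with
  | nil => exact absurd rfl hpre
  | cons a rest =>
      unfold verify_ops verify_ops_alt
      have hlen1 : (((a :: rest).length : Int) - 1) = (rest.length : Int) := by
        simp
      have hget0 : PySem.List.pyGetD (a :: rest) 0 0 = a := by
        simp [pysem]
      rw [Bool.eq_iff_iff]
      rw [PySem.List.slice_from_one]
      simp only [List.tail_cons, hlen1, Int.toNat_natCast, hget0]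
      rw [List.any_eq_true, PySem.Set.contains_iff, mem_reach]
      constructor
      · rintro ⟨ops, hops, hval⟩
        have hval' := beq_iff_eq.mp hval
        refine ⟨a, by simp [PySem.Set.ofList, PySem.Set.add, PySem.Set.empty], ops, hops, ?_⟩
        rw [← hval']
        exact (evalA_eq_evalZip a rest ops (le_of_eq (length_of_mem_opLists hops).symm) a).symm
      · rintro ⟨v, hv, ops, hops, hval⟩
        have hva : v = a := by
          simpa [PySem.Set.ofList, PySem.Set.add, PySem.Set.empty] using hv
        subst hva
        refine ⟨ops, hops, beq_iff_eq.mpr ?_⟩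
        rw [evalA_eq_evalZip v rest ops (le_of_eq (length_of_mem_opLists hops).symm) v]
        exact hval
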